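-- pv_equiv track=rewrite | github.com/TheOneMightyArc/namechecker | namechecker.py | _check_name_characters
-- ===== SOURCE A (Python) =====
-- def _check_name_characters(name_to_check: str, allowed_set: set) -> tuple[bool, list[str]]:
--     if not name_to_check:
--         return True, []
--     invalid_chars = []
--     is_valid = True
--     for char_val in name_to_check:
--         if char_val not in allowed_set:
--             is_valid = False
--             if char_val not in invalid_chars:
--                 invalid_chars.append(char_val)
--     return is_valid, invalid_chars
-- ===== SOURCE B (Python) =====
-- def _check_name_characters(name_to_check: str, allowed_set: set) -> tuple[bool, list[str]]:
--     is_valid = set(name_to_check) <= set(allowed_set)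
--     invalid_chars = [c for c in dict.fromkeys(name_to_check) if c not in allowed_set]
--     return is_valid, invalid_chars
-- ===== Notes on version B (the rewrite author's own statement) =====
-- stated objective: simpler
-- what changed: Replaces the single flag-tracking loop with two independent computations: validity as a subset test set(name) <= allowed, and the ordered distinct invalid characters as a filter over dict.fromkeys dedup; no flag, no dedup-by-membership append, no empty-name guard.
import Mathlib
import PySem

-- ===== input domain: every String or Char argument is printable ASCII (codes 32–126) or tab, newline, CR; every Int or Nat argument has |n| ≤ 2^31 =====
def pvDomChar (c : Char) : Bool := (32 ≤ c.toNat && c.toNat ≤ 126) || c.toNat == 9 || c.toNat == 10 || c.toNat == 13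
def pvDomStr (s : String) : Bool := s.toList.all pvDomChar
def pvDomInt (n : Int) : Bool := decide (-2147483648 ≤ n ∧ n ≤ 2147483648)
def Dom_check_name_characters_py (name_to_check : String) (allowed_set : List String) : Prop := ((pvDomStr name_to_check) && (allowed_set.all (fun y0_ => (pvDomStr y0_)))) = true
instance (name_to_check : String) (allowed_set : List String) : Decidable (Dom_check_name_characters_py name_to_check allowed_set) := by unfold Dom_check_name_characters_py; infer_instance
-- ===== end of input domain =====

-- B splits A's flag-tracking loop into a set-subset validity test plus a filter over an ordered dedup; return value only, same results.


-- ===== PORT A =====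
-- literal transliteration: empty-name guard, then one loop maintaining (is_valid, invalid_chars)
def check_name_characters_py (name_to_check : String) (allowed_set : List String) : Bool × List String :=
  if name_to_check = "" then (true, [])
  else
    name_to_check.toList.foldl
      (fun (st : Bool × List String) (char_val : Char) =>
        let s := String.ofList [char_val]
        if s ∈ allowed_set then st
        else (false, if s ∈ st.2 then st.2 else st.2 ++ [s]))
      (true, [])

-- ===== PORT B =====
-- set(name) <= set(allowed)  and  [c for c in dict.fromkeys(name) if c not in allowed]
def check_name_characters_py_alt (name_to_check : String) (allowed_set : List String) : Bool × List String :=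
  let chars := name_to_check.toList.map (fun c => String.ofList [c])
  (PySem.Set.issubset (PySem.Set.ofList chars) (PySem.Set.ofList allowed_set),
   (PySem.List.dedup chars).filter (fun s => !decide (s ∈ allowed_set)))

-- ===== PRECONDITION & SPEC =====
def Spec_check_name_characters_py (name_to_check : String) (allowed_set : List String) (out : Bool × List String) : Prop := out = check_name_characters_py_alt name_to_check allowed_set
instance (name_to_check : String) (allowed_set : List String) (out : Bool × List String) : Decidable (Spec_check_name_characters_py name_to_check allowed_set out) := by unfold Spec_check_name_characters_py; infer_instance

-- ===== CLAIM (what is proved, stated in full; the proofs are below) =====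
def Claim_equal_check_name_characters_py : Prop := ∀ (name_to_check : String) (allowed_set : List String), Dom_check_name_characters_py name_to_check allowed_set → Spec_check_name_characters_py name_to_check allowed_set (check_name_characters_py name_to_check allowed_set)

-- ===== LEMMAS AND PROOFS =====

theorem pv_main (allowed : List String) (l : List Char) (v : Bool) (acc : List String) :
    l.foldl
      (fun (st : Bool × List String) (char_val : Char) =>
        let s := String.ofList [char_val]
        if s ∈ allowed then st
        else (false, if s ∈ st.2 then st.2 else st.2 ++ [s]))
      (v, acc)
    = (v && l.all (fun c => decide (String.ofList [c] ∈ allowed)),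
       acc ++ (PySem.Set.ofList (l.map (fun c => String.ofList [c]))).filter
         (fun s => decide (s ∉ allowed) && decide (s ∉ acc))) := by
  induction l generalizing v acc with
  | nil => simp
  | cons c l ih =>
    simp only [List.foldl_cons, List.map_cons, PySem.Set.ofList_cons, List.all_cons]
    by_cases hc : String.ofList [c] ∈ allowed
    · rw [if_pos hc, ih]
      simp [hc, PySem.Set.discard]
      exact List.filter_congr (fun s _ => by by_cases hs : s = String.ofList [c] <;> simp [hs, hc])
    · rw [if_neg hc]
      by_cases hm : String.ofList [c] ∈ acc
      · rw [if_pos hm, ih]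
        simp [hc, hm, PySem.Set.discard]
        exact List.filter_congr (fun s _ => by by_cases hs : s = String.ofList [c] <;> simp [hs, hm])
      · rw [if_neg hm, ih]
        simp [hc, hm, PySem.Set.discard, List.append_assoc]
        exact List.filter_congr (fun s _ => by by_cases hs : s = String.ofList [c] <;> simp [hs, hm])

theorem pv_valid (allowed : List String) (l : List Char) :
    (l.all (fun c => decide (String.ofList [c] ∈ allowed)))
    = PySem.Set.issubset (PySem.Set.ofList (l.map (fun c => String.ofList [c]))) (PySem.Set.ofList allowed) := by
  rw [Bool.eq_iff_iff, List.all_eq_true, PySem.Set.issubset_iff]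
  constructor
  · intro h s hs
    rw [PySem.Set.mem_ofList, List.mem_map] at hs
    obtain ⟨c, hc, rfl⟩ := hs
    have := h c hc
    simpa [PySem.Set.mem_ofList] using this
  · intro h c hc
    have := h (String.ofList [c]) (by rw [PySem.Set.mem_ofList, List.mem_map]; exact ⟨c, hc, rfl⟩)
    simpa [PySem.Set.mem_ofList] using this

-- ===== VERDICT (by name: the statement is the Claim_ definition above) =====
theorem check_name_characters_py_spec : Claim_equal_check_name_characters_py := by
  intro name allowed _
  show check_name_characters_py name allowed = check_name_characters_py_alt name allowed
  unfold check_name_characters_py check_name_characters_py_alt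
  by_cases hn : name = ""
  · subst hn; simp
  · rw [if_neg hn, pv_main, pv_valid]
    simp [PySem.List.dedup_eq_ofList]
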